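-- pv_equiv track=rewrite | github.com/piyushsatti/Nonagon | scripts/convert_indent_to_tabs.py | to_tabs_prefix
-- ===== SOURCE A (Python) =====
-- TABSTOP = 4
--
-- def to_tabs_prefix(s: str) -> str:
-- 	# Compute visual columns of the leading whitespace
-- 	cols = 0
-- 	i = 0
-- 	n = len(s)
-- 	while i < n and s[i] in (" ", "\t"):
-- 		if s[i] == "\t":
-- 			cols += TABSTOP - (cols % TABSTOP)
-- 		else:
-- 			cols += 1
-- 		i += 1
-- 	# Round up to next tab boundary to eliminate any partial spaces
-- 	if cols % TABSTOP != 0: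
-- 		cols += TABSTOP - (cols % TABSTOP)
-- 	tabs = "\t" * (cols // TABSTOP)
-- 	return tabs + s[i:]
-- ===== SOURCE B (Python) =====
-- TABSTOP = 4
--
-- def to_tabs_prefix(s: str) -> str:
--     # Split the leading whitespace on tabs; each tab-terminated run of spaces
--     # yields len//4 + 1 output tabs (a tab always advances to the NEXT stop),
--     # and the trailing run of spaces rounds up: ceil(len/4) tabs.
--     stripped = s.lstrip(" \t")
--     segs = s[:len(s) - len(stripped)].split("\t")
--     ntabs = sum(len(r) // TABSTOP + 1 for r in segs[:-1])
--     ntabs += (len(segs[-1]) + TABSTOP - 1) // TABSTOP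
--     return "\t" * ntabs + stripped
-- ===== Notes on version B (the rewrite author's own statement) =====
-- stated objective: alternative
-- what changed: Instead of simulating visual columns with a stateful scan and rounding up at the end, B splits the leading whitespace on tabs and computes the emitted tab count per segment by closed-form arithmetic (len//4+1 for each tab-terminated run of spaces, ceil(len/4) for the final run), maintaining no column state at all.
import Mathlib
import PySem

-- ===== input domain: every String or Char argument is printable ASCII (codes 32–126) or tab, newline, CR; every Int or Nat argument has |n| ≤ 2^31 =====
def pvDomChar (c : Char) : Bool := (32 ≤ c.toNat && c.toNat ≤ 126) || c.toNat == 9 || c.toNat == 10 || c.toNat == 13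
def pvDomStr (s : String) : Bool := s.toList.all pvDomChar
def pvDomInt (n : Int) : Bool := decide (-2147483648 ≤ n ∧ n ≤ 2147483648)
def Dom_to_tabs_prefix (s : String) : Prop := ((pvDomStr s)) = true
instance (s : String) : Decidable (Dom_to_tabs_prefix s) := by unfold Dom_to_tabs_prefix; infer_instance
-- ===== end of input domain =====

-- B replaces A's visual-column simulation with a split-on-tabs decomposition: each
-- tab-terminated run of spaces contributes len/4+1 tabs, the final run ceil(len/4).


-- ===== PORT A =====
-- A's while loop: walk the leading run of ' '/'\t', maintaining the visual column.
def toTabsLoopA : List Char → Nat → (Nat × List Char)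
  | [], cols => (cols, [])
  | c :: rest, cols =>
    if c = ' ' ∨ c = '\t' then
      if c = '\t' then toTabsLoopA rest (cols + (4 - cols % 4))
      else toTabsLoopA rest (cols + 1)
    else (cols, c :: rest)

def to_tabs_prefix (s : String) : String :=
  let r := toTabsLoopA s.toList 0
  let cols := if r.1 % 4 ≠ 0 then r.1 + (4 - r.1 % 4) else r.1
  String.ofList (List.replicate (cols / 4) '\t' ++ r.2)

-- ===== PORT B =====
-- B: stripped = s.lstrip(" \t")
def lstripWT : List Char → List Char
  | [] => []
  | c :: rest => if c = ' ' ∨ c = '\t' then lstripWT rest else c :: rest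

-- B: hand port of str.split("\t") (exact: segments between tabs, always nonempty)
def splitTab : List Char → List (List Char)
  | [] => [[]]
  | c :: rest =>
    match splitTab rest with
    | [] => [[]]   -- unreachable: splitTab is never empty
    | seg :: segs => if c = '\t' then [] :: seg :: segs else (c :: seg) :: segs

def to_tabs_prefix_alt (s : String) : String :=
  let stripped := lstripWT s.toList
  let segs := splitTab (s.toList.take (s.toList.length - stripped.length))
  let ntabs := (segs.dropLast.map (fun r => r.length / 4 + 1)).sum
      + ((segs.getLastD []).length + 4 - 1) / 4
  String.ofList (List.replicate ntabs '\t' ++ stripped)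

-- ===== PRECONDITION & SPEC =====
def Spec_to_tabs_prefix (s : String) (out : String) : Prop := out = to_tabs_prefix_alt s
instance (s : String) (out : String) : Decidable (Spec_to_tabs_prefix s out) := by unfold Spec_to_tabs_prefix; infer_instance

-- ===== CLAIM =====
def Claim_equal_to_tabs_prefix : Prop := ∀ (s : String), Dom_to_tabs_prefix s → Spec_to_tabs_prefix s (to_tabs_prefix s)

-- ===== LEMMAS AND PROOFS =====
def isWT (c : Char) : Bool := c = ' ' ∨ c = '\t'

-- tab count with k chars already in the current segment (abstract middle form)
def tabsSeg : List Char → Nat → Nat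
  | [], k => (k + 3) / 4
  | c :: p, k => if c = '\t' then k / 4 + 1 + tabsSeg p 0 else tabsSeg p (k + 1)

-- column accumulation of A's loop over the whitespace prefix
def colsFold : List Char → Nat → Nat
  | [], c => c
  | ch :: rest, c => colsFold rest (if ch = '\t' then c + (4 - c % 4) else c + 1)

theorem lstrip_eq_dropWhile (l : List Char) : lstripWT l = l.dropWhile isWT := by
  induction l with
  | nil => rfl
  | cons c rest ih =>
    by_cases h : c = ' ' ∨ c = '\t' <;>
      simp [lstripWT, List.dropWhile, isWT, h, ih]

theorem take_sub_eq_takeWhile (l : List Char) :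
    l.take (l.length - (l.dropWhile isWT).length) = l.takeWhile isWT := by
  have key := List.takeWhile_append_dropWhile (p := isWT) (l := l)
  have hlen : (l.takeWhile isWT).length + (l.dropWhile isWT).length = l.length := by
    rw [← List.length_append, key]
  rw [show l.length - (l.dropWhile isWT).length = (l.takeWhile isWT).length by omega]
  nth_rewrite 2 [← key]
  exact List.take_left

theorem loopA_eq (l : List Char) (col : Nat) :
    toTabsLoopA l col = (colsFold (l.takeWhile isWT) col, l.dropWhile isWT) := by
  induction l generalizing col with
  | nil => simp [toTabsLoopA, colsFold]
  | cons c rest ih =>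
    by_cases h : c = ' ' ∨ c = '\t'
    · by_cases ht : c = '\t'
      · subst ht
        simp [toTabsLoopA, List.takeWhile, List.dropWhile, isWT, colsFold, ih]
      · have hs : c = ' ' := by tauto
        subst hs
        simp [toTabsLoopA, List.takeWhile, List.dropWhile, isWT, colsFold, ih]
    · have hs : ¬ c = ' ' := fun hc => h (Or.inl hc)
      have ht : ¬ c = '\t' := fun hc => h (Or.inr hc)
      simp [toTabsLoopA, List.takeWhile, List.dropWhile, isWT, hs, ht, colsFold]

theorem splitTab_ne_nil (p : List Char) : splitTab p ≠ [] := by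
  cases p with
  | nil => simp [splitTab]
  | cons c rest =>
    simp only [splitTab]
    cases splitTab rest with
    | nil => simp
    | cons seg segs => by_cases h : c = '\t' <;> simp [h]

-- S segs k: the per-segment count with k extra chars on the head segment
def segSum : List (List Char) → Nat → Nat
  | [], k => (k + 3) / 4
  | [seg], k => (seg.length + k + 3) / 4
  | seg :: s2 :: rest, k => (seg.length + k) / 4 + 1 + segSum (s2 :: rest) 0

theorem segSum_cons (c : Char) (hd : List Char) (tl : List (List Char)) (k : Nat) :
    segSum ((c :: hd) :: tl) k = segSum (hd :: tl) (k + 1) := by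
  cases tl <;> simp [segSum] <;> omega

theorem splitTab_tabsSeg (p : List Char) (k : Nat) :
    segSum (splitTab p) k = tabsSeg p k := by
  induction p generalizing k with
  | nil => simp [splitTab, segSum, tabsSeg]
  | cons c rest ih =>
    have hne := splitTab_ne_nil rest
    rcases hseg : splitTab rest with _ | ⟨seg, segs⟩
    · exact absurd hseg hne
    · by_cases h : c = '\t'
      · have h0 := ih 0
        rw [hseg] at h0
        simp only [splitTab, hseg, h, if_pos, tabsSeg]
        cases segs <;> rw [← h0] <;> simp [segSum]
      · have hk := ih (k + 1)
        rw [hseg] at hk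
        rw [show splitTab (c :: rest) = (c :: seg) :: segs from by simp [splitTab, hseg, h],
          segSum_cons, hk]
        simp [tabsSeg, h]

theorem segSum_eq_formula (segs : List (List Char)) (h : segs ≠ []) :
    (segs.dropLast.map (fun r => r.length / 4 + 1)).sum
      + ((segs.getLastD []).length + 4 - 1) / 4 = segSum segs 0 := by
  induction segs with
  | nil => exact absurd rfl h
  | cons seg tl ih =>
    cases tl with
    | nil => simp [segSum]
    | cons s2 rest =>
      have := ih (by simp)
      simp only [List.dropLast_cons_of_ne_nil (by simp : s2 :: rest ≠ ([] : List (List Char))),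
        List.map_cons, List.sum_cons, List.getLastD_cons, segSum] at *
      omega

theorem colsFold_tabsSeg (p : List Char) (t k : Nat) :
    (colsFold p (4 * t + k) + 3) / 4 = t + tabsSeg p k := by
  induction p generalizing t k with
  | nil => simp [colsFold, tabsSeg]; omega
  | cons c rest ih =>
    by_cases h : c = '\t'
    · have harg : 4 * t + k + (4 - (4 * t + k) % 4) = 4 * (t + k / 4 + 1) + 0 := by omega
      simp only [colsFold, tabsSeg, h, if_true, harg]
      rw [ih]
      omega
    · have harg : 4 * t + k + 1 = 4 * t + (k + 1) := by omega
      simp only [colsFold, tabsSeg, h, if_false, harg, ih]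

-- ===== VERDICT =====
theorem to_tabs_prefix_spec : Claim_equal_to_tabs_prefix := by
  intro s _
  unfold Spec_to_tabs_prefix to_tabs_prefix to_tabs_prefix_alt
  simp only [lstrip_eq_dropWhile, take_sub_eq_takeWhile, loopA_eq]
  rw [segSum_eq_formula _ (splitTab_ne_nil _), splitTab_tabsSeg]
  have hc : (colsFold (s.toList.takeWhile isWT) 0 + 3) / 4
      = tabsSeg (s.toList.takeWhile isWT) 0 := by
    simpa using colsFold_tabsSeg (s.toList.takeWhile isWT) 0 0
  have hcount : (if colsFold (s.toList.takeWhile isWT) 0 % 4 ≠ 0 then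
        colsFold (s.toList.takeWhile isWT) 0 + (4 - colsFold (s.toList.takeWhile isWT) 0 % 4)
      else colsFold (s.toList.takeWhile isWT) 0) / 4
      = tabsSeg (s.toList.takeWhile isWT) 0 := by
    split_ifs with hh <;> omega
  rw [hcount]
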